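-- pv_equiv track=rewrite | github.com/sskhan67/GPGPU-Programming- | QODE/qode/many_body/hierarchical_fluctuations/translationally_transformed/amplitude_equations/latex_syntax.py | get_excitation_string
-- ===== SOURCE A (Python) =====
-- def get_one_excitation_string(orbitals, spacing):
-- 	upper_indices  =  '{}({})'.format( orbitals[0],   spacing[0]    )
-- 	lower_indices  =  '{}({})'.format( orbitals[1],   spacing[1]    )
-- 	string = 't^{{{}}}_{{{}}}'.format( upper_indices, lower_indices )
-- 	return(string)
--
-- def get_two_excitation_string(orbitals, spacing):
-- 	up_rgt  = '{}({})'.format( orbitals[0], spacing[0] )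
-- 	up_lft  = '{}({})'.format( orbitals[1], spacing[1] )
-- 	low_rgt = '{}({})'.format( orbitals[2], spacing[2] )
-- 	low_lft = '{}({})'.format( orbitals[3], spacing[3] )
-- 	string  = 't^{{{}{}}}_{{{}{}}}'.format( up_rgt, up_lft, low_rgt, low_lft )
-- 	return(string)
--
-- def get_excitation_string(operators):
-- 	n_operators = int( len(operators)/2 )
-- 	string = ''
-- 	for i in range(n_operators):
-- 		excitation_level = int( len(operators[2*i])/2 )
-- 		if excitation_level == 1:
-- 			orbitals = operators[2*i]
-- 			spacing  = operators[2*i+1]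
-- 			string  += get_one_excitation_string( orbitals, spacing )
-- 		if excitation_level == 2:
-- 			orbitals = operators[2*i]
-- 			spacing  = operators[2*i+1]
-- 			string  += get_two_excitation_string( orbitals, spacing )
-- 	return(string)
-- ===== SOURCE B (Python) =====
-- def _piece(orbitals, spacing):
--     level = len(orbitals) // 2
--     if level not in (1, 2):
--         return ''
--     terms = ['{}({})'.format(o, s) for o, s in zip(orbitals, spacing)]
--     upper = ''.join(terms[:level])
--     lower = ''.join(terms[level:2 * level])
--     return 't^{{{}}}_{{{}}}'.format(upper, lower)
--
-- def get_excitation_string(operators):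
--     it = iter(operators)
--     return ''.join(_piece(orbitals, spacing) for orbitals, spacing in zip(it, it))
-- ===== Notes on version B (the rewrite author's own statement) =====
-- stated objective: idiomatic
-- what changed: Replaces the index-arithmetic loop over range(len//2) with two fixed-arity unrolled helpers by idiomatic zip(it, it) consecutive pairing and one parametric piece builder that zips orbitals with spacings and slices the formatted terms by level, joined at the end.
-- outside the precondition, e.g. on get_excitation_string([['a', 'b'], ['1']]): A raises IndexError, B returns 't^{a(1)}_{}'
import Mathlib
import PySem

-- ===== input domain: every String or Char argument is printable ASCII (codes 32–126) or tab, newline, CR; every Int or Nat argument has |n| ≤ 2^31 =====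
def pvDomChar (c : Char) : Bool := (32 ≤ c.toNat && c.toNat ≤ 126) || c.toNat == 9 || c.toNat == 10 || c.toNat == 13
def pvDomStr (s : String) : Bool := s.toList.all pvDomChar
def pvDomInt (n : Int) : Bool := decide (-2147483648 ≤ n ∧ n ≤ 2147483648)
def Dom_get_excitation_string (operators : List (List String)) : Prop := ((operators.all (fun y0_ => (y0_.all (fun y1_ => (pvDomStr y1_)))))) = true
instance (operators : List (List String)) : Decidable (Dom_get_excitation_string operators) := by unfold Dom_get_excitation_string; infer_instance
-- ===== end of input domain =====

-- B replaces A's index loop and two unrolled helpers by consecutive pairing (zip(it, it))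
-- with one parametric piece builder, joined at the end (objective: idiomatic); same output.


-- ===== PORT A =====
-- Out-of-range indexing (Python IndexError) is excluded by Pre_; the getD defaults
-- below never fire on inputs satisfying Pre_get_excitation_string.
def get_one_excitation_string (orbitals spacing : List String) : String :=
  let upper_indices := orbitals.getD 0 "" ++ "(" ++ spacing.getD 0 "" ++ ")"
  let lower_indices := orbitals.getD 1 "" ++ "(" ++ spacing.getD 1 "" ++ ")"
  "t^{" ++ upper_indices ++ "}_{" ++ lower_indices ++ "}"

def get_two_excitation_string (orbitals spacing : List String) : String :=
  let up_rgt := orbitals.getD 0 "" ++ "(" ++ spacing.getD 0 "" ++ ")"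
  let up_lft := orbitals.getD 1 "" ++ "(" ++ spacing.getD 1 "" ++ ")"
  let low_rgt := orbitals.getD 2 "" ++ "(" ++ spacing.getD 2 "" ++ ")"
  let low_lft := orbitals.getD 3 "" ++ "(" ++ spacing.getD 3 "" ++ ")"
  "t^{" ++ up_rgt ++ up_lft ++ "}_{" ++ low_rgt ++ low_lft ++ "}"

-- A's loop body, named so the proofs can speak about it (same code as the Python loop body).
def pvStepA (operators : List (List String)) (string : String) (i : Nat) : String :=
  let excitation_level := (operators.getD (2*i) []).length / 2
  let string := if excitation_level = 1 then
      string ++ get_one_excitation_string (operators.getD (2*i) []) (operators.getD (2*i+1) [])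
    else string
  if excitation_level = 2 then
    string ++ get_two_excitation_string (operators.getD (2*i) []) (operators.getD (2*i+1) [])
  else string

def get_excitation_string (operators : List (List String)) : String :=
  (List.range (operators.length / 2)).foldl (pvStepA operators) ""

-- ===== PORT B =====
def pvPiece (orbitals spacing : List String) : String :=
  let level := orbitals.length / 2
  if level = 1 ∨ level = 2 then
    let terms := (orbitals.zip spacing).map (fun t => t.1 ++ "(" ++ t.2 ++ ")")
    "t^{" ++ String.join (terms.take level) ++ "}_{" ++
      String.join ((terms.drop level).take level) ++ "}"
  else ""

-- zip(it, it): consecutive pairing, truncating an odd trailing element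
def pvPairs : List (List String) → List (List String × List String)
  | orbitals :: spacing :: rest => (orbitals, spacing) :: pvPairs rest
  | _ => []

def get_excitation_string_alt (operators : List (List String)) : String :=
  String.join ((pvPairs operators).map (fun p => pvPiece p.1 p.2))

-- ===== PRECONDITION & SPEC =====
-- Pre_ excludes exactly the inputs on which A raises IndexError: a pair whose
-- orbital list has excitation level 1 or 2 but whose spacing list is shorter than
-- 2*level.
def Pre_get_excitation_string (operators : List (List String)) : Prop :=
  ∀ i < operators.length / 2,
    ((operators.getD (2*i) []).length / 2 = 1 ∨ (operators.getD (2*i) []).length / 2 = 2) →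
      2 * ((operators.getD (2*i) []).length / 2) ≤ (operators.getD (2*i+1) []).length
instance (operators : List (List String)) : Decidable (Pre_get_excitation_string operators) := by
  unfold Pre_get_excitation_string; infer_instance

def pvWitness_get_excitation_string : List (List String) :=
  [["a", "b"], ["1", "2"], ["p", "q", "r", "s"], ["5", "6", "7", "8"]]

def Spec_get_excitation_string (operators : List (List String)) (out : String) : Prop := out = get_excitation_string_alt operators
instance (operators : List (List String)) (out : String) : Decidable (Spec_get_excitation_string operators out) := by unfold Spec_get_excitation_string; infer_instance

-- ===== CLAIM (what is proved, stated in full; the proofs are below) =====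
def Claim_equal_get_excitation_string : Prop := ∀ (operators : List (List String)), Dom_get_excitation_string operators → Pre_get_excitation_string operators → Spec_get_excitation_string operators (get_excitation_string operators)

-- ===== LEMMAS AND PROOFS =====

-- A's step appends its contribution on the right of the accumulator.
theorem pvStepA_acc (operators : List (List String)) (s : String) (i : Nat) :
    pvStepA operators s i = s ++ pvStepA operators "" i := by
  unfold pvStepA
  dsimp only
  split_ifs <;> simp [String.append_assoc]

-- hence the fold distributes over the initial accumulator
theorem pvFold_acc (operators : List (List String)) (l : List Nat) (s : String) :
    l.foldl (pvStepA operators) s = s ++ l.foldl (pvStepA operators) "" := by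
  induction l generalizing s with
  | nil => simp
  | cons a l ih =>
    simp only [List.foldl_cons]
    rw [ih (pvStepA operators s a), pvStepA_acc, ih (pvStepA operators "" a),
      String.append_assoc]

theorem pvStepA_shift (a b : List String) (rest : List (List String)) (s : String) (i : Nat) :
    pvStepA (a :: b :: rest) s (i + 1) = pvStepA rest s i := by
  unfold pvStepA
  have h2 : 2 * (i + 1) = 2 * i + 1 + 1 := by ring
  simp [h2]

theorem pvA_cons (a b : List String) (rest : List (List String)) :
    get_excitation_string (a :: b :: rest) =
      pvStepA (a :: b :: rest) "" 0 ++ get_excitation_string rest := by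
  unfold get_excitation_string
  have hlen : (a :: b :: rest).length / 2 = rest.length / 2 + 1 := by
    simp; omega
  rw [hlen, List.range_succ_eq_map, List.foldl_cons, List.foldl_map]
  have hfun : (fun (s : String) (i : Nat) => pvStepA (a :: b :: rest) s (Nat.succ i)) =
      pvStepA rest := by
    funext s i
    exact pvStepA_shift a b rest s i
  rw [hfun, pvFold_acc]

-- the contribution of one admissible pair is B's piece
theorem pvPair_eq (a b : List String)
    (hp : (a.length / 2 = 1 ∨ a.length / 2 = 2) → 2 * (a.length / 2) ≤ b.length) :
    pvStepA (a :: b :: rest) "" 0 = pvPiece a b := by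
  unfold pvStepA pvPiece
  simp only [Nat.mul_zero, List.getD_cons_zero, Nat.zero_add, List.getD_cons_succ]
  by_cases h1 : a.length / 2 = 1
  · have hb : 2 ≤ b.length := by have := hp (Or.inl h1); omega
    have ha : 2 ≤ a.length := by omega
    match a, ha with
    | o0 :: o1 :: t, _ =>
      match b, hb with
      | s0 :: s1 :: u, _ =>
        simp only [h1] at *
        simp [get_one_excitation_string, String.join, String.append_assoc]
  · by_cases h2 : a.length / 2 = 2
    · have hb : 4 ≤ b.length := by have := hp (Or.inr h2); omega
      have ha : 4 ≤ a.length := by omega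
      match a, ha with
      | o0 :: o1 :: o2 :: o3 :: t, _ =>
        match b, hb with
        | s0 :: s1 :: s2 :: s3 :: u, _ =>
          simp only [h2] at *
          simp [get_two_excitation_string, String.join, String.append_assoc]
    · simp [h1, h2]

theorem pvPre_tail (a b : List String) (rest : List (List String))
    (h : Pre_get_excitation_string (a :: b :: rest)) : Pre_get_excitation_string rest := by
  intro i hi
  have h2 : 2 * (i + 1) = 2 * i + 1 + 1 := by ring
  have := h (i + 1) (by simp; omega)
  simpa [h2] using this

theorem pvFoldStr (l : List String) (s : String) :
    l.foldl (· ++ ·) s = s ++ l.foldl (· ++ ·) "" := by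
  induction l generalizing s with
  | nil => simp
  | cons a l ih =>
    rw [List.foldl_cons, List.foldl_cons, ih (s ++ a), ih ("" ++ a)]
    simp [String.append_assoc]

theorem pvJoin_cons (s : String) (l : List String) :
    String.join (s :: l) = s ++ String.join l := by
  simp only [String.join, List.foldl_cons]
  rw [pvFoldStr]
  simp

theorem pvMain : ∀ (operators : List (List String)),
    Pre_get_excitation_string operators →
      get_excitation_string operators = get_excitation_string_alt operators := by
  intro ops
  induction ops using pvPairs.induct with
  | case1 a b rest ih =>
    intro hpre
    rw [pvA_cons, ih (pvPre_tail a b rest hpre)]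
    unfold get_excitation_string_alt
    rw [pvPairs, List.map_cons, pvJoin_cons]
    congr 1
    apply pvPair_eq
    have := hpre 0 (by simp)
    simpa using this
  | case2 ops hshape =>
    intro _
    rcases ops with _ | ⟨a, _ | ⟨b, rest⟩⟩
    · rfl
    · simp [get_excitation_string, get_excitation_string_alt, pvPairs, String.join]
    · exact (hshape a b rest rfl).elim

-- ===== VERDICT (by name: the statement is the Claim_ definition above) =====
theorem get_excitation_string_spec : Claim_equal_get_excitation_string := by
  intro ops _ hpre
  exact pvMain ops hpre
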